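-- pv_equiv track=rewrite | github.com/SoneyBoney/advent_of_code_2023 | day23/part2.py | get_all_forks
-- ===== SOURCE A (Python) =====
-- def get_all_forks(grid):
--     ret = []
--     r_max = len(grid)
--     c_max = len(grid[0])
--     steps = 0
--     for r in range(len(grid)):
--         for c in range(len(grid[0])):
--             elem = grid[r][c]
--             if elem == '#': continue
--             neighbors = 0
--             for rr,cc in [(1,0),(-1,0),(0,1),(0,-1)]:
--                 new_r = r + rr
--                 new_c = c + cc
--                 if 0<=new_r<r_max and 0<=new_c<c_max and grid[new_r][new_c] != '#':
--                     neighbors += 1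
--             if neighbors >= 3: # is a fork (original position is also a neighbor)
--                 ret.append((r,c))
--     return ret
-- ===== SOURCE B (Python) =====
-- def get_all_forks(grid):
--     R = len(grid)
--     C = len(grid[0])
--     deg = {}
--     get = deg.get
--     for r in range(R):
--         row = grid[r]
--         below = grid[r + 1] if r + 1 < R else None
--         for c in range(C):
--             if row[c] == '#':
--                 continue
--             p = (r, c)
--             if c + 1 < C and row[c + 1] != '#':
--                 q = (r, c + 1)
--                 deg[p] = get(p, 0) + 1
--                 deg[q] = get(q, 0) + 1
--             if below is not None and below[c] != '#':
--                 q = (r + 1, c)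
--                 deg[p] = get(p, 0) + 1
--                 deg[q] = get(q, 0) + 1
--     return [(r, c) for r in range(R) for c in range(C)
--             if grid[r][c] != '#' and get((r, c), 0) >= 3]
-- ===== Notes on version B (the rewrite author's own statement) =====
-- stated objective: alternative
-- what changed: Replaces the per-cell scan of all four neighbours with a single edge-accumulation pass: each right/down edge between two open cells bumps a degree counter for both endpoints in a dict, and a second row-major sweep collects the open cells whose accumulated degree is >= 3.
import Mathlib
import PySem

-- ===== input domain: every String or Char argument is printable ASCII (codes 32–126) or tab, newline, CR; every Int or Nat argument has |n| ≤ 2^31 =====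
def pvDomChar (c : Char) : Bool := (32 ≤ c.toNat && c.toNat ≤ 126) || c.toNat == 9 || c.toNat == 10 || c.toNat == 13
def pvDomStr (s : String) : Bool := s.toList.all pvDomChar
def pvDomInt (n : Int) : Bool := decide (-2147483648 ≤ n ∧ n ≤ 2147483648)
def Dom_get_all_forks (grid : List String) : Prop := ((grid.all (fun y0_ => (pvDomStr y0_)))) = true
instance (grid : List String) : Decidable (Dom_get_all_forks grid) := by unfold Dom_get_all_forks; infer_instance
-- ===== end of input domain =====

-- B replaces A's per-cell four-neighbour scan with one right/down edge-accumulation pass into a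
-- degree dict plus a second row-major sweep (objective: alternative decomposition, same cost).

-- shared indexing helper: grid[r][c] for in-range nonnegative r, c ('#' outside; Pre_ keeps all
-- accesses in range, where this is exact Python semantics)
def pvCharAt (grid : List String) (r c : Int) : Char :=
  match PySem.List.pyGet? grid r with
  | some s => (PySem.Str.pyGet? s c).getD '#'
  | none => '#'

-- ===== PORT A =====
def get_all_forks (grid : List String) : List (Int × Int) :=
  let r_max : Int := grid.length
  let c_max : Int := match grid with
    | [] => 0            -- Python raises IndexError on grid[0] here; excluded by Pre_
    | g0 :: _ => (g0.length : Int)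
  (PySem.List.pyRange 0 r_max 1).foldl (fun ret r =>
    (PySem.List.pyRange 0 c_max 1).foldl (fun ret c =>
      let elem := pvCharAt grid r c
      if elem = '#' then ret
      else
        let neighbors : Int :=
          ([((1:Int),(0:Int)),(-1,0),(0,1),(0,-1)]).foldl (fun n d =>
            let new_r := r + d.1
            let new_c := c + d.2
            if 0 ≤ new_r ∧ new_r < r_max ∧ 0 ≤ new_c ∧ new_c < c_max ∧
                pvCharAt grid new_r new_c ≠ '#' then n + 1 else n) 0
        if neighbors ≥ 3 then ret ++ [(r, c)] else ret) ret) []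

-- ===== PORT B =====
-- the degree bumps generated at cell (r, c): its right edge and its down edge, when both ends open
def pvCellBumps (grid : List String) (R C : Int) (r c : Int) : List (Int × Int) :=
  if pvCharAt grid r c = '#' then []
  else
    (if c + 1 < C ∧ pvCharAt grid r (c + 1) ≠ '#' then [(r, c), (r, c + 1)] else []) ++
    (if r + 1 < R ∧ pvCharAt grid (r + 1) c ≠ '#' then [(r, c), (r + 1, c)] else [])

def pvBumps (grid : List String) (R C : Int) : List (Int × Int) :=
  (PySem.List.pyRange 0 R 1).flatMap (fun r =>
    (PySem.List.pyRange 0 C 1).flatMap (fun c => pvCellBumps grid R C r c))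

def get_all_forks_alt (grid : List String) : List (Int × Int) :=
  let R : Int := grid.length
  let C : Int := match grid with
    | [] => 0            -- Python raises IndexError on grid[0] here; excluded by Pre_
    | g0 :: _ => (g0.length : Int)
  let deg : PySem.Dict (Int × Int) Int :=
    (pvBumps grid R C).foldl (fun d p => d.modify p 0 (· + 1)) PySem.Dict.empty
  (PySem.List.pyRange 0 R 1).flatMap (fun r =>
    (PySem.List.pyRange 0 C 1).flatMap (fun c =>
      if pvCharAt grid r c ≠ '#' ∧ deg.getD (r, c) 0 ≥ 3 then [(r, c)] else []))

-- ===== PRECONDITION & SPEC =====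
-- Pre_ excludes exactly the inputs where Python A raises IndexError: the empty grid (grid[0]) and
-- ragged grids with a row shorter than row 0 (grid[r][c] out of range).
def Pre_get_all_forks (grid : List String) : Prop :=
  grid ≠ [] ∧ ∀ s ∈ grid, (grid.headD "").length ≤ s.length
instance (grid : List String) : Decidable (Pre_get_all_forks grid) := by
  unfold Pre_get_all_forks; infer_instance
def pvWitness_get_all_forks : List String := ["...", ".#.", "..."]

def Spec_get_all_forks (grid : List String) (out : List (Int × Int)) : Prop := out = get_all_forks_alt grid
instance (grid : List String) (out : List (Int × Int)) : Decidable (Spec_get_all_forks grid out) := by unfold Spec_get_all_forks; infer_instance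

-- ===== CLAIM (what is proved, stated in full; the proofs are below) =====
def Claim_equal_get_all_forks : Prop := ∀ (grid : List String), Dom_get_all_forks grid → Pre_get_all_forks grid → Spec_get_all_forks grid (get_all_forks grid)

-- ===== LEMMAS AND PROOFS =====

def pvI (p : Prop) [Decidable p] : Int := if p then 1 else 0


-- A's per-cell emission, as a pure function of the cell
def pvNeigh (grid : List String) (r_max c_max r c : Int) : Int :=
  ([((1:Int),(0:Int)),(-1,0),(0,1),(0,-1)]).foldl (fun n d =>
    if 0 ≤ r + d.1 ∧ r + d.1 < r_max ∧ 0 ≤ c + d.2 ∧ c + d.2 < c_max ∧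
        pvCharAt grid (r + d.1) (c + d.2) ≠ '#' then n + 1 else n) 0

def pvCellOutA (grid : List String) (r_max c_max r c : Int) : List (Int × Int) :=
  if ¬ pvCharAt grid r c = '#' ∧ pvNeigh grid r_max c_max r c ≥ 3 then [(r, c)] else []

theorem pv_sum_ite_range (m : Nat) (x v : Int) :
    ((List.range m).map (fun k : Nat => if (k : Int) = x then v else 0)).sum
      = if 0 ≤ x ∧ x < (m : Int) then v else 0 := by
  induction m with
  | zero =>
      simp only [List.range_zero, List.map_nil, List.sum_nil]
      rw [if_neg (by omega)]
  | succ m ih =>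
      rw [List.range_succ, List.map_append, List.sum_append, ih]
      simp only [List.map_cons, List.map_nil, List.sum_cons, List.sum_nil]
      push_cast
      split_ifs <;> omega

theorem pv_sum_ite_pyRange (n x v : Int) :
    ((PySem.List.pyRange 0 n 1).map (fun i => if i = x then v else 0)).sum
      = if 0 ≤ x ∧ x < n then v else 0 := by
  rw [PySem.List.pyRange_one, List.map_map]
  have h := pv_sum_ite_range (n - 0).toNat x v
  by_cases hn : 0 < n
  · have hcast : ((n - 0).toNat : Int) = n := by omega
    simp only [Function.comp_def, zero_add] at h ⊢
    rw [h, hcast]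
  · have h0 : (n - 0).toNat = 0 := by omega
    rw [h0]
    simp only [List.range_zero, List.map_nil, List.sum_nil]
    rw [if_neg (by omega)]

theorem pv_sum2 (Rn Cn pr pc v : Int) :
    ((PySem.List.pyRange 0 Rn 1).map (fun r =>
        ((PySem.List.pyRange 0 Cn 1).map (fun c => if r = pr ∧ c = pc then v else 0)).sum)).sum
      = if 0 ≤ pr ∧ pr < Rn ∧ 0 ≤ pc ∧ pc < Cn then v else 0 := by
  have hin : (fun r => ((PySem.List.pyRange 0 Cn 1).map
        (fun c => if r = pr ∧ c = pc then v else 0)).sum)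
      = (fun r => if r = pr then (if 0 ≤ pc ∧ pc < Cn then v else 0) else 0) := by
    funext r
    by_cases h : r = pr
    · subst h; simpa using pv_sum_ite_pyRange Cn pc v
    · simp [h]
  rw [hin, pv_sum_ite_pyRange]
  split_ifs <;> omega

theorem pv_count_flatMap_int {α β : Type} [BEq β] (l : List α) (f : α → List β) (b : β) :
    (((l.flatMap f).count b : Nat) : Int) = (l.map (fun a => ((f a).count b : Int))).sum := by
  induction l with
  | nil => simp
  | cons a t ih => simp [List.count_append, ih]

theorem pv_cellcount (grid : List String) (R C r c r' c' : Int) :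
    (((pvCellBumps grid R C r' c').count (r, c) : Nat) : Int)
      = (if r' = r ∧ c' = c then
            pvI (pvCharAt grid r c ≠ '#' ∧ c + 1 < C ∧ pvCharAt grid r (c + 1) ≠ '#')
              + pvI (pvCharAt grid r c ≠ '#' ∧ r + 1 < R ∧ pvCharAt grid (r + 1) c ≠ '#') else 0)
        + (if r' = r ∧ c' = c - 1 then
            pvI (pvCharAt grid r (c - 1) ≠ '#' ∧ c - 1 + 1 < C ∧ pvCharAt grid r c ≠ '#') else 0)
        + (if r' = r - 1 ∧ c' = c then
            pvI (pvCharAt grid (r - 1) c ≠ '#' ∧ r - 1 + 1 < R ∧ pvCharAt grid r c ≠ '#') else 0) := by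
  unfold pvCellBumps pvI
  split_ifs <;>
    simp_all [List.count_append, List.count_cons, beq_iff_eq, Prod.mk.injEq, Prod.ext_iff] <;>
    omega

set_option maxHeartbeats 2000000 in
theorem pv_deg (grid : List String) (R C r c : Int)
    (hr : 0 ≤ r) (hr2 : r < R) (hc : 0 ≤ c) (hc2 : c < C) :
    ((pvBumps grid R C).foldl (fun d p => d.modify p 0 (· + 1)) PySem.Dict.empty).getD (r, c) 0
      = pvI (pvCharAt grid r c ≠ '#' ∧ c + 1 < C ∧ pvCharAt grid r (c + 1) ≠ '#')
        + pvI (pvCharAt grid r c ≠ '#' ∧ r + 1 < R ∧ pvCharAt grid (r + 1) c ≠ '#')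
        + pvI (1 ≤ c ∧ pvCharAt grid r (c - 1) ≠ '#' ∧ pvCharAt grid r c ≠ '#')
        + pvI (1 ≤ r ∧ pvCharAt grid (r - 1) c ≠ '#' ∧ pvCharAt grid r c ≠ '#') := by
  rw [PySem.Dict.getD_foldl_modify_add_one]
  rw [PySem.Dict.getD_empty]
  unfold pvBumps
  rw [zero_add]
  rw [pv_count_flatMap_int]
  have hcell : ∀ r'' : Int, (fun c'' => ((((pvCellBumps grid R C r'' c'').count (r, c) : Nat)) : Int))
      = fun c'' =>
        (if r'' = r ∧ c'' = c then
            pvI (pvCharAt grid r c ≠ '#' ∧ c + 1 < C ∧ pvCharAt grid r (c + 1) ≠ '#')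
              + pvI (pvCharAt grid r c ≠ '#' ∧ r + 1 < R ∧ pvCharAt grid (r + 1) c ≠ '#') else 0)
        + ((if r'' = r ∧ c'' = c - 1 then
            pvI (pvCharAt grid r (c - 1) ≠ '#' ∧ c - 1 + 1 < C ∧ pvCharAt grid r c ≠ '#') else 0)
        + (if r'' = r - 1 ∧ c'' = c then
            pvI (pvCharAt grid (r - 1) c ≠ '#' ∧ r - 1 + 1 < R ∧ pvCharAt grid r c ≠ '#') else 0)) := by
    intro r''; funext c''; rw [pv_cellcount]; ring
  calc ((PySem.List.pyRange 0 R 1).map fun a =>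
          (((PySem.List.pyRange 0 C 1).flatMap fun c_1 => pvCellBumps grid R C a c_1).count (r, c) : Int)).sum
      = ((PySem.List.pyRange 0 R 1).map fun r'' =>
          ((PySem.List.pyRange 0 C 1).map fun c'' =>
            (((pvCellBumps grid R C r'' c'').count (r, c) : Nat) : Int)).sum).sum := by
        apply congrArg
        apply List.map_congr_left
        intro r'' _
        rw [pv_count_flatMap_int]
    _ = pvI (pvCharAt grid r c ≠ '#' ∧ c + 1 < C ∧ pvCharAt grid r (c + 1) ≠ '#')
        + pvI (pvCharAt grid r c ≠ '#' ∧ r + 1 < R ∧ pvCharAt grid (r + 1) c ≠ '#')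
        + pvI (1 ≤ c ∧ pvCharAt grid r (c - 1) ≠ '#' ∧ pvCharAt grid r c ≠ '#')
        + pvI (1 ≤ r ∧ pvCharAt grid (r - 1) c ≠ '#' ∧ pvCharAt grid r c ≠ '#') := by
        have hsplit : ∀ r'' : Int, ((PySem.List.pyRange 0 C 1).map fun c'' =>
              (((pvCellBumps grid R C r'' c'').count (r, c) : Nat) : Int)).sum
            = ((PySem.List.pyRange 0 C 1).map fun c'' =>
                (if r'' = r ∧ c'' = c then
                    pvI (pvCharAt grid r c ≠ '#' ∧ c + 1 < C ∧ pvCharAt grid r (c + 1) ≠ '#')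
                      + pvI (pvCharAt grid r c ≠ '#' ∧ r + 1 < R ∧ pvCharAt grid (r + 1) c ≠ '#') else 0)).sum
              + (((PySem.List.pyRange 0 C 1).map fun c'' =>
                  (if r'' = r ∧ c'' = c - 1 then
                    pvI (pvCharAt grid r (c - 1) ≠ '#' ∧ c - 1 + 1 < C ∧ pvCharAt grid r c ≠ '#') else 0)).sum
                + ((PySem.List.pyRange 0 C 1).map fun c'' =>
                  (if r'' = r - 1 ∧ c'' = c then
                    pvI (pvCharAt grid (r - 1) c ≠ '#' ∧ r - 1 + 1 < R ∧ pvCharAt grid r c ≠ '#') else 0)).sum) := by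
          intro r''
          rw [hcell r'']
          rw [PySem.List.sum_map_add_int, PySem.List.sum_map_add_int]
        calc ((PySem.List.pyRange 0 R 1).map fun r'' =>
                ((PySem.List.pyRange 0 C 1).map fun c'' =>
                  (((pvCellBumps grid R C r'' c'').count (r, c) : Nat) : Int)).sum).sum
            = ((PySem.List.pyRange 0 R 1).map fun r'' =>
                ((PySem.List.pyRange 0 C 1).map fun c'' =>
                  (if r'' = r ∧ c'' = c then
                    pvI (pvCharAt grid r c ≠ '#' ∧ c + 1 < C ∧ pvCharAt grid r (c + 1) ≠ '#')
                      + pvI (pvCharAt grid r c ≠ '#' ∧ r + 1 < R ∧ pvCharAt grid (r + 1) c ≠ '#') else 0)).sum).sum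
              + (((PySem.List.pyRange 0 R 1).map fun r'' =>
                  ((PySem.List.pyRange 0 C 1).map fun c'' =>
                    (if r'' = r ∧ c'' = c - 1 then
                      pvI (pvCharAt grid r (c - 1) ≠ '#' ∧ c - 1 + 1 < C ∧ pvCharAt grid r c ≠ '#') else 0)).sum).sum
                + ((PySem.List.pyRange 0 R 1).map fun r'' =>
                    ((PySem.List.pyRange 0 C 1).map fun c'' =>
                      (if r'' = r - 1 ∧ c'' = c then
                        pvI (pvCharAt grid (r - 1) c ≠ '#' ∧ r - 1 + 1 < R ∧ pvCharAt grid r c ≠ '#') else 0)).sum).sum) := by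
              rw [← PySem.List.sum_map_add_int, ← PySem.List.sum_map_add_int]
              apply congrArg; apply List.map_congr_left; intro r'' _; rw [hsplit r'']
          _ = _ := by
              rw [pv_sum2, pv_sum2, pv_sum2]
              unfold pvI
              by_cases o0 : pvCharAt grid r c = '#' <;>
              by_cases o1 : pvCharAt grid r (c + 1) = '#' <;>
              by_cases o2 : pvCharAt grid (r + 1) c = '#' <;>
              by_cases o3 : pvCharAt grid r (c - 1) = '#' <;>
              by_cases o4 : pvCharAt grid (r - 1) c = '#' <;>
                (try simp only [o0, o1, o2, o3, o4, ne_eq, not_true_eq_false, not_false_eq_true,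
                  true_and, and_true, false_and, and_false, if_true, if_false]) <;>
                (try split_ifs) <;> omega

-- the two per-cell emissions agree for in-range cells
set_option maxHeartbeats 1000000 in
theorem pv_counts_eq (grid : List String) (R C r c : Int)
    (hr : 0 ≤ r) (hr2 : r < R) (hc : 0 ≤ c) (hc2 : c < C) (ho : pvCharAt grid r c ≠ '#') :
    pvNeigh grid R C r c
      = pvI (pvCharAt grid r c ≠ '#' ∧ c + 1 < C ∧ pvCharAt grid r (c + 1) ≠ '#')
        + pvI (pvCharAt grid r c ≠ '#' ∧ r + 1 < R ∧ pvCharAt grid (r + 1) c ≠ '#')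
        + pvI (1 ≤ c ∧ pvCharAt grid r (c - 1) ≠ '#' ∧ pvCharAt grid r c ≠ '#')
        + pvI (1 ≤ r ∧ pvCharAt grid (r - 1) c ≠ '#' ∧ pvCharAt grid r c ≠ '#') := by
  unfold pvNeigh pvI at *
  simp only [List.foldl_cons, List.foldl_nil, add_zero, ← sub_eq_add_neg]
  by_cases h1 : pvCharAt grid (r + 1) c = '#' <;>
  by_cases h2 : pvCharAt grid (r - 1) c = '#' <;>
  by_cases h3 : pvCharAt grid r (c + 1) = '#' <;>
  by_cases h4 : pvCharAt grid r (c - 1) = '#' <;>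
    simp only [ho, h1, h2, h3, h4, ne_eq, not_true_eq_false, not_false_eq_true,
      true_and, false_and, and_true, and_false, if_true, if_false] <;>
    (try split_ifs) <;> omega

theorem pv_cell_eq (grid : List String) (R C r c : Int)
    (hr : 0 ≤ r) (hr2 : r < R) (hc : 0 ≤ c) (hc2 : c < C) :
    pvCellOutA grid R C r c
      = (if pvCharAt grid r c ≠ '#' ∧
            ((pvBumps grid R C).foldl (fun d p => d.modify p 0 (· + 1))
              PySem.Dict.empty).getD (r, c) (0 : Int) ≥ (3 : Int) then [(r, c)] else []) := by
  unfold pvCellOutA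
  simp only [ne_eq]
  by_cases ho : pvCharAt grid r c = '#'
  · rw [if_neg (by simp [ho]), if_neg (by simp [ho])]
  · have hn := pv_counts_eq grid R C r c hr hr2 hc hc2 ho
    simp only [pv_deg grid R C r c hr hr2 hc hc2, ← hn]

theorem pv_emit {α : Type} (P : Prop) [Decidable P] (n : Int) (x : α) (ret : List α) :
    (if P then ret else if n ≥ 3 then ret ++ [x] else ret)
      = ret ++ (if ¬P ∧ n ≥ 3 then [x] else []) := by
  split_ifs <;> simp_all

theorem pv_flatMap_congr {α β : Type} (l : List α) (f g : α → List β)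
    (h : ∀ x ∈ l, f x = g x) : l.flatMap f = l.flatMap g := by
  induction l with
  | nil => rfl
  | cons a t ih => simp only [List.flatMap_cons]; rw [h a (by simp), ih (fun x hx => h x (by simp [hx]))]

-- ===== VERDICT (by name: the statement is the Claim_ definition above) =====
theorem get_all_forks_spec : Claim_equal_get_all_forks := by
  intro grid _ hpre
  unfold Spec_get_all_forks
  rcases grid with _ | ⟨g0, gs⟩
  · exact absurd rfl hpre.1
  simp only [get_all_forks, get_all_forks_alt]
  -- A's nested accumulating loop as a flatMap of per-cell emissions
  have hA : ∀ (Rv Cv : Int),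
      (PySem.List.pyRange 0 Rv 1).foldl (fun ret r =>
        (PySem.List.pyRange 0 Cv 1).foldl (fun ret c =>
          if pvCharAt (g0 :: gs) r c = '#' then ret
          else if ([((1:Int),(0:Int)),(-1,0),(0,1),(0,-1)]).foldl (fun n d =>
              if 0 ≤ r + d.1 ∧ r + d.1 < Rv ∧ 0 ≤ c + d.2 ∧ c + d.2 < Cv ∧
                  pvCharAt (g0 :: gs) (r + d.1) (c + d.2) ≠ '#' then n + 1 else n) (0 : Int) ≥ 3
            then ret ++ [(r, c)] else ret) ret) []
      = (PySem.List.pyRange 0 Rv 1).flatMap (fun r =>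
          (PySem.List.pyRange 0 Cv 1).flatMap (fun c => pvCellOutA (g0 :: gs) Rv Cv r c)) := by
    intro Rv Cv
    have hcell : ∀ (ret : List (Int × Int)) (r c : Int),
        (if pvCharAt (g0 :: gs) r c = '#' then ret
          else if ([((1:Int),(0:Int)),(-1,0),(0,1),(0,-1)]).foldl (fun n d =>
              if 0 ≤ r + d.1 ∧ r + d.1 < Rv ∧ 0 ≤ c + d.2 ∧ c + d.2 < Cv ∧
                  pvCharAt (g0 :: gs) (r + d.1) (c + d.2) ≠ '#' then n + 1 else n) (0 : Int) ≥ 3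
            then ret ++ [(r, c)] else ret)
        = ret ++ pvCellOutA (g0 :: gs) Rv Cv r c := by
      intro ret r c
      unfold pvCellOutA pvNeigh
      rw [pv_emit (pvCharAt (g0 :: gs) r c = '#')]
    have hrow : ∀ (ret : List (Int × Int)) (r : Int),
        (PySem.List.pyRange 0 Cv 1).foldl (fun ret c =>
          if pvCharAt (g0 :: gs) r c = '#' then ret
          else if ([((1:Int),(0:Int)),(-1,0),(0,1),(0,-1)]).foldl (fun n d =>
              if 0 ≤ r + d.1 ∧ r + d.1 < Rv ∧ 0 ≤ c + d.2 ∧ c + d.2 < Cv ∧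
                  pvCharAt (g0 :: gs) (r + d.1) (c + d.2) ≠ '#' then n + 1 else n) (0 : Int) ≥ 3
            then ret ++ [(r, c)] else ret) ret
        = ret ++ (PySem.List.pyRange 0 Cv 1).flatMap (fun c => pvCellOutA (g0 :: gs) Rv Cv r c) := by
      intro ret r
      have hf : (fun (acc : List (Int × Int)) (c : Int) =>
            if pvCharAt (g0 :: gs) r c = '#' then acc
            else if ([((1:Int),(0:Int)),(-1,0),(0,1),(0,-1)]).foldl (fun n d =>
                if 0 ≤ r + d.1 ∧ r + d.1 < Rv ∧ 0 ≤ c + d.2 ∧ c + d.2 < Cv ∧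
                    pvCharAt (g0 :: gs) (r + d.1) (c + d.2) ≠ '#' then n + 1 else n) (0 : Int) ≥ 3
              then acc ++ [(r, c)] else acc)
          = fun acc c => acc ++ pvCellOutA (g0 :: gs) Rv Cv r c :=
        funext fun acc => funext fun c => hcell acc r c
      rw [hf, PySem.List.foldl_append_eq_flatMap]
    have hg : (fun (ret : List (Int × Int)) (r : Int) =>
          (PySem.List.pyRange 0 Cv 1).foldl (fun ret c =>
            if pvCharAt (g0 :: gs) r c = '#' then ret
            else if ([((1:Int),(0:Int)),(-1,0),(0,1),(0,-1)]).foldl (fun n d =>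
                if 0 ≤ r + d.1 ∧ r + d.1 < Rv ∧ 0 ≤ c + d.2 ∧ c + d.2 < Cv ∧
                    pvCharAt (g0 :: gs) (r + d.1) (c + d.2) ≠ '#' then n + 1 else n) (0 : Int) ≥ 3
              then ret ++ [(r, c)] else ret) ret)
        = fun ret r =>
            ret ++ (PySem.List.pyRange 0 Cv 1).flatMap (fun c => pvCellOutA (g0 :: gs) Rv Cv r c) :=
      funext fun ret => funext fun r => hrow ret r
    rw [hg, PySem.List.foldl_append_eq_flatMap, List.nil_append]
  refine (hA ((g0 :: gs).length : Int) (g0.length : Int)).trans ?_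
  apply pv_flatMap_congr
  intro r hrmem
  apply pv_flatMap_congr
  intro c hcmem
  rw [PySem.List.mem_pyRange_one] at hrmem hcmem
  exact pv_cell_eq (g0 :: gs) _ _ r c hrmem.1 hrmem.2 hcmem.1 hcmem.2
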